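-- pv_equiv track=rewrite | github.com/jiwooh/CSED342-HW | HW2/submission.py | extractNgramFeatures
-- ===== SOURCE A (Python) =====
-- def extractNgramFeatures(x, n):
--     """
--     Extract n-gram features for a string x
--
--     @param string x, int n:
--     @return dict: feature vector representation of x. (key: n consecutive word (string) / value: occurrence)
--
--     For example:
--     >>> extractNgramFeatures("I am what I am", 2)
--     {'I am': 2, 'am what': 1, 'what I': 1}
--
--     Note:
--     There should be a space between words and NO spaces at the beginning and end of the key
--     -> "I am" (O) " I am" (X) "I am " (X) "Iam" (X)
--
--     Another example
--     >>> extractNgramFeatures("I am what I am what I am", 3)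
--     {'I am what': 2, 'am what I': 2, 'what I am': 2}
--     """
--     # BEGIN_YOUR_ANSWER
--     ngram = {}
--     x = x.split()
--     for i in range(0, len(x) - n + 1):
--         block = " ".join(x[i:i+n])
--         if block not in ngram:
--             ngram[block] = 1
--         else:
--             ngram[block] += 1
--     return ngram
-- ===== SOURCE B (Python) =====
-- def extractNgramFeatures(x, n):
--     def grams(ws):
--         if not ws or len(ws) < n:
--             return []
--         return [" ".join(ws[:n])] + grams(ws[1:])
--     gs = grams(x.split())
--     return {g: gs.count(g) for g in dict.fromkeys(gs)}
-- ===== Notes on version B (the rewrite author's own statement) =====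
-- stated objective: alternative
-- what changed: Replaces A's indexed loop with incremental dict counting by a recursion over suffixes of the word list that collects the gram keys, followed by staged passes: dedup the keys with dict.fromkeys and count each distinct key with list.count; n <= 0 is outside the natural domain and excluded by Pre_ (A returns a degenerate {'': len(words)-n+1} there, B a different degenerate value).
-- outside the precondition, e.g. on extractNgramFeatures('a b', 0): A returns {'': 3}, B returns {'': 2}; on extractNgramFeatures('a b', -2): A returns {'': 5}, B returns {'': 2}
import Mathlib
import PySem

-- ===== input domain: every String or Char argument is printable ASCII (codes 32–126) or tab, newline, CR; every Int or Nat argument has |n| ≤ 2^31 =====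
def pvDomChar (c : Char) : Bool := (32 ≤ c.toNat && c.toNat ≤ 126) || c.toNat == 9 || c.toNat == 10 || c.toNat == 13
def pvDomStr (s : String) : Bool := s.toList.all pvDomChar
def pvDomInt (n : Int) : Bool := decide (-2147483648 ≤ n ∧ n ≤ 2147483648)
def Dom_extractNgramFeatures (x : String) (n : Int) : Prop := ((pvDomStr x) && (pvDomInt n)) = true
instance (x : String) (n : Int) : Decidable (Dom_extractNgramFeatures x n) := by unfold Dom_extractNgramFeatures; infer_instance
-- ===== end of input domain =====

-- B replaces A's indexed loop with incremental dict counting by a recursion over suffixes that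
-- collects the gram keys, then staged passes: dedup (dict.fromkeys) and a count per distinct key
-- (different decomposition, not faster); equivalence is proved for n ≥ 1, the natural domain.

-- ===== PORT A =====
-- A: words = x.split(); for i in range(0, len(words)-n+1): block = " ".join(words[i:i+n]);
--    if block not in ngram: ngram[block] = 1 else: ngram[block] += 1
def extractNgramFeatures (x : String) (n : Int) : List (String × Int) :=
  let words := PySem.Str.split₀ x
  let ngram := (PySem.List.pyRange 0 ((words.length : Int) - n + 1) 1).foldl
    (fun d i =>
      let block := PySem.Str.join " " (PySem.List.slice words (some i) (some (i + n)))
      if !d.contains block then d.insert block 1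
      else d.insert block (d.getD block 0 + 1)) PySem.Dict.empty
  ngram.items

-- ===== PORT B =====
-- def grams(ws): if not ws or len(ws) < n: return []
--                return [" ".join(ws[:n])] + grams(ws[1:])
def pvGrams (n : Int) : List String → List String
  | [] => []
  | w :: ws =>
    if (((w :: ws).length : Int) : Int) < n then []
    else PySem.Str.join " " (PySem.List.slice (w :: ws) none (some n)) :: pvGrams n ws

-- {g: gs.count(g) for g in dict.fromkeys(gs)}
def extractNgramFeatures_alt (x : String) (n : Int) : List (String × Int) :=
  let gs := pvGrams n (PySem.Str.split₀ x)
  ((PySem.List.dedup gs).foldl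
    (fun d g => d.insert g ((gs.count g : Int))) PySem.Dict.empty).items

-- ===== PRECONDITION & SPEC =====
-- Pre_ excludes n ≤ 0, outside the task's natural domain (an n-gram has at least one word, so no
-- caller specifies a count for n ≤ 0): there A returns the degenerate {'': len(words)-n+1} (every
-- window joins to the empty string) and B returns a different degenerate value; either answer is
-- as defensible as the other on such a request, and B does not copy A's.
def Pre_extractNgramFeatures (x : String) (n : Int) : Prop := 1 ≤ n
instance (x : String) (n : Int) : Decidable (Pre_extractNgramFeatures x n) := by unfold Pre_extractNgramFeatures; infer_instance

def pvWitness_extractNgramFeatures : String × Int := ("I am what I am", 2)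

def Spec_extractNgramFeatures (x : String) (n : Int) (out : List (String × Int)) : Prop := out = extractNgramFeatures_alt x n
instance (x : String) (n : Int) (out : List (String × Int)) : Decidable (Spec_extractNgramFeatures x n out) := by unfold Spec_extractNgramFeatures; infer_instance

-- ===== CLAIM (what is proved, stated in full; the proofs are below) =====
def Claim_equal_extractNgramFeatures : Prop := ∀ (x : String) (n : Int), Dom_extractNgramFeatures x n → Pre_extractNgramFeatures x n → Spec_extractNgramFeatures x n (extractNgramFeatures x n)

-- ===== LEMMAS AND PROOFS =====

-- B's recursion over suffixes yields exactly the sliding-window key list, indexed.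
lemma pvGrams_eq_map_range (N : Nat) (hN : 1 ≤ N) (ws : List String) :
    pvGrams (N : Int) ws
      = (List.range (ws.length + 1 - N)).map
          (fun i => PySem.Str.join " " ((ws.drop i).take N)) := by
  induction ws with
  | nil =>
    have h0 : 0 + 1 - N = 0 := by omega
    simp [pvGrams, h0]
  | cons w ws' ih =>
    rw [pvGrams]
    by_cases h : ((w :: ws').length : Int) < (N : Int)
    · rw [if_pos h]
      have hlt : (w :: ws').length < N := by exact_mod_cast h
      simp only [List.length_cons] at hlt
      have h0 : ws'.length + 1 + 1 - N = 0 := by omega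
      simp [h0]
    · rw [if_neg h, ih]
      have hle : N ≤ (w :: ws').length := by
        have := not_lt.mp h; exact_mod_cast this
      simp only [List.length_cons] at hle
      have hsz : ws'.length + 1 + 1 - N = (ws'.length + 1 - N) + 1 := by omega
      rw [List.length_cons, hsz, List.range_succ_eq_map, List.map_cons, List.map_map,
        PySem.List.slice_to_natCast]
      simp [Function.comp_def]

-- A's membership-test branch computes exactly the counter update.
lemma update_branch_eq (d : PySem.Dict String Int) (k : String) :
    (if (!d.contains k) = true then d.insert k 1 else d.insert k (d.getD k 0 + 1))
      = d.insert k (d.getD k 0 + 1) := by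
  by_cases h : d.contains k = true
  · simp [h]
  · simp only [Bool.not_eq_true] at h
    have h0 : d.getD k 0 = 0 := PySem.Dict.getD_of_not_contains d 0 h
    simp [h, h0]

-- ===== VERDICT (by name: the statement is the Claim_ definition above) =====
theorem extractNgramFeatures_spec : Claim_equal_extractNgramFeatures := by
  intro x n _ hn
  replace hn : (1 : Int) ≤ n := hn
  unfold Spec_extractNgramFeatures
  simp only [extractNgramFeatures, extractNgramFeatures_alt]
  set words := PySem.Str.split₀ x with hw
  obtain ⟨N, rfl⟩ : ∃ N : Nat, n = (N : Int) := ⟨n.toNat, by omega⟩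
  have hN : 1 ≤ N := by exact_mod_cast hn
  -- A's loop: index range as a Nat range, body as the counter update on the i-th window
  rw [PySem.List.pyRange_one,
    show (((words.length : Int) - (N : Int) + 1) - 0).toNat = words.length + 1 - N by omega,
    List.foldl_map]
  simp only [zero_add, PySem.List.slice_natCast_add, update_branch_eq]
  rw [← List.foldl_map
    (f := fun i : Nat => PySem.Str.join " " ((words.drop i).take N))
    (g := fun (d : PySem.Dict String Int) k => d.insert k (d.getD k 0 + 1)),
    PySem.Dict.foldl_insert_getD_add_one_eq_counter, PySem.Dict.items_counter]
  -- B's side: the recursion yields the same key list; fresh distinct keys append in order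
  rw [pvGrams_eq_map_range N hN words]
  set gs := (List.range (words.length + 1 - N)).map
      (fun i => PySem.Str.join " " ((words.drop i).take N)) with hgs
  have hfresh : ((PySem.List.dedup gs).foldl
      (fun d g => d.insert g ((gs.count g : Int))) PySem.Dict.empty).items
      = PySem.Dict.empty.items ++ (PySem.List.dedup gs).map (fun g => (g, (gs.count g : Int))) :=
    PySem.Dict.items_foldl_insert_fresh (l := PySem.List.dedup gs) (k := fun g => g)
      (v := fun g => (gs.count g : Int)) (d := PySem.Dict.empty)
      (fun a _ => PySem.Dict.contains_empty a)
      (by simp)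
  rw [hfresh]
  simp [PySem.List.dedup_eq_ofList, PySem.Dict.empty]
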